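-- pv_equiv track=rewrite | github.com/mrosata/codetex-mcp | benchmarks/test_ab_comparison_bench.py | _simulate_baseline_response
-- ===== SOURCE A (Python) =====
-- from typing import Any
--
-- def _simulate_baseline_response(task: dict[str, Any]) -> str:
--     """Simulate a baseline LLM response (without context).
--
--     Uses a degraded version of the verifiable answer to simulate
--     what an LLM might produce without project-specific context.
--     Removes some symbols and lines to represent lower quality.
--     """
--     answer = task.get("verifiable_answer", "")
--     if not answer:
--         return ""
--
--     lines = answer.splitlines()
--     # Keep roughly 60-80% of lines to simulate partial correctness
--     # Remove lines containing project-specific implementation details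
--     kept: list[str] = []
--     for i, line in enumerate(lines):
--         # Keep the first few lines (imports, function signature) always
--         if i < 3:
--             kept.append(line)
--             continue
--         # Drop every 4th line to simulate gaps
--         if i % 4 == 3:
--             continue
--         kept.append(line)
--
--     return "\n".join(kept)
-- ===== SOURCE B (Python) =====
-- def _simulate_baseline_response(task):
--     answer = task.get("verifiable_answer", "")
--     if not answer:
--         return ""
--     lines = answer.splitlines()
--     # Blockwise: of every block of 4 lines, keep the first 3.
--     kept = []
--     while lines:
--         kept.extend(lines[:3])
--         lines = lines[4:]
--     return "\n".join(kept)
-- ===== Notes on version B (the rewrite author's own statement) =====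
-- stated objective: simpler
-- what changed: Replaces the per-line enumerate loop with its index<3 special case and i%4==3 test by a blockwise slicing pass that keeps the first 3 lines of every block of 4 (the i<3 branch of A is redundant).
import Mathlib
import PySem

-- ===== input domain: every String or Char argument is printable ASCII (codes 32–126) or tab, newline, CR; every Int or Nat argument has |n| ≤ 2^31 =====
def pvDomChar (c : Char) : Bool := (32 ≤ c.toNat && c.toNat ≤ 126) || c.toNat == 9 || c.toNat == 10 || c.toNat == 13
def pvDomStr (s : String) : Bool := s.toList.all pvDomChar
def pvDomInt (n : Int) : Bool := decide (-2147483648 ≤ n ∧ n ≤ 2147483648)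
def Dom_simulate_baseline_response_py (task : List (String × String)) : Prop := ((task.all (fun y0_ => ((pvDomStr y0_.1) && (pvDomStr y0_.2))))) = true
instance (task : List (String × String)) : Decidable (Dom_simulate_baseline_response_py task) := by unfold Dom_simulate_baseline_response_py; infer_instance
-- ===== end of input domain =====

-- B replaces A's per-line enumerate loop (index<3 special case + i%4==3 test) by a
-- blockwise slicing pass keeping the first 3 lines of each block of 4; objective: simpler.

-- ===== PORT A =====
def simulate_baseline_response_py (task : List (String × String)) : String :=
  let answer := PySem.Dict.getD (PySem.Dict.mk task) "verifiable_answer" ""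
  if answer = "" then ""
  else
    let lines := PySem.Str.splitlines answer
    let kept := (PySem.List.enumerate lines 0).foldl (fun kept p =>
      if p.1 < 3 then kept ++ [p.2]
      else if PySem.Int.mod p.1 4 = 3 then kept
      else kept ++ [p.2]) []
    PySem.Str.join "\n" kept

-- ===== PORT B =====
-- the `while lines:` loop of Source B: keep lines[:3], continue on lines[4:]
def pvAltKeep (l : List String) : List String :=
  if h : l = [] then []
  else PySem.List.slice l none (some 3) ++ pvAltKeep (PySem.List.slice l (some 4) none)
termination_by l.length
decreasing_by
  cases l with
  | nil => exact absurd rfl h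
  | cons x xs => simp [pysem]

def simulate_baseline_response_py_alt (task : List (String × String)) : String :=
  let answer := PySem.Dict.getD (PySem.Dict.mk task) "verifiable_answer" ""
  if answer = "" then ""
  else PySem.Str.join "\n" (pvAltKeep (PySem.Str.splitlines answer))

-- ===== PRECONDITION & SPEC =====
def Spec_simulate_baseline_response_py (task : List (String × String)) (out : String) : Prop := out = simulate_baseline_response_py_alt task
instance (task : List (String × String)) (out : String) : Decidable (Spec_simulate_baseline_response_py task out) := by unfold Spec_simulate_baseline_response_py; infer_instance

-- ===== CLAIM (what is proved, stated in full; the proofs are below) =====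
def Claim_equal_simulate_baseline_response_py : Prop := ∀ (task : List (String × String)), Dom_simulate_baseline_response_py task → Spec_simulate_baseline_response_py task (simulate_baseline_response_py task)

-- ===== LEMMAS AND PROOFS =====

-- A's filter, written as index-carrying recursion
def pvKeepIdx (i : Int) (l : List String) : List String :=
  match l with
  | [] => []
  | x :: xs =>
    if i < 3 then x :: pvKeepIdx (i + 1) xs
    else if PySem.Int.mod i 4 = 3 then pvKeepIdx (i + 1) xs
    else x :: pvKeepIdx (i + 1) xs

theorem pvFoldA_eq_keepIdx (l : List String) (i : Int) (acc : List String) :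
    (PySem.List.enumerate l i).foldl (fun kept p =>
      if p.1 < 3 then kept ++ [p.2]
      else if PySem.Int.mod p.1 4 = 3 then kept
      else kept ++ [p.2]) acc = acc ++ pvKeepIdx i l := by
  induction l generalizing i acc with
  | nil => simp [PySem.List.enumerate_nil, pvKeepIdx]
  | cons x xs ih =>
    rw [PySem.List.enumerate_cons]
    simp only [List.foldl_cons, pvKeepIdx]
    split_ifs <;> rw [ih] <;> simp

theorem pvKeepIdx_shift (xs : List String) (i : Int) (hi : 0 ≤ i) :
    pvKeepIdx (i + 4) xs = pvKeepIdx i xs := by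
  induction xs generalizing i with
  | nil => rfl
  | cons x xs ih =>
    have hmod : PySem.Int.mod (i + 4) 4 = PySem.Int.mod i 4 := by
      rw [PySem.Int.mod_eq_emod_of_pos (by norm_num),
          PySem.Int.mod_eq_emod_of_pos (by norm_num)]
      omega
    have hih := ih (i + 1) (by omega)
    simp only [pvKeepIdx, hmod]
    have h4 : ¬ (i + 4 < 3) := by omega
    by_cases h1 : i < 3
    · have : PySem.Int.mod i 4 = i := by
        rw [PySem.Int.mod_eq_emod_of_pos (by norm_num)]; omega
      have hne : ¬ (PySem.Int.mod i 4 = 3) := by omega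
      simp only [if_neg h4, if_neg hne, if_pos h1]
      rw [show i + 4 + 1 = i + 1 + 4 by ring, hih]
    · by_cases h2 : PySem.Int.mod i 4 = 3 <;>
        simp only [if_neg h4, if_neg h1, h2, if_pos, reduceIte] <;>
        · rw [show i + 4 + 1 = i + 1 + 4 by ring, hih]

theorem pvAltKeep_nil : pvAltKeep [] = [] := by rw [pvAltKeep]; rfl

set_option maxHeartbeats 2000000 in
theorem pvKeepIdx_eq_altKeep (l : List String) : pvKeepIdx 0 l = pvAltKeep l := by
  induction l using pvAltKeep.induct with
  | case1 => rw [pvAltKeep]; rfl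
  | case2 l h ih =>
    rw [pvAltKeep, dif_neg h]
    rcases l with _ | ⟨x, _ | ⟨y, _ | ⟨z, _ | ⟨w, r⟩⟩⟩⟩
    · exact absurd rfl h
    · clear ih h; simp [pysem, pvKeepIdx, pvAltKeep_nil]
    · clear ih h; simp [pysem, pvKeepIdx, pvAltKeep_nil]
    · clear ih h; simp [pysem, pvKeepIdx, pvAltKeep_nil]
    · have e1 : pvKeepIdx 0 (x :: y :: z :: w :: r) = x :: y :: z :: pvKeepIdx 4 r := by
        simp [pvKeepIdx]
      have e2 : pvKeepIdx 4 r = pvKeepIdx 0 r := by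
        have := pvKeepIdx_shift r 0 (le_refl 0)
        simpa using this
      have ihr : pvKeepIdx 0 r = pvAltKeep r := by
        simpa [pysem] using ih
      rw [e1, e2, ihr]
      simp [pysem]

theorem simulate_baseline_response_py_spec : Claim_equal_simulate_baseline_response_py := by
  intro task _
  unfold Spec_simulate_baseline_response_py simulate_baseline_response_py simulate_baseline_response_py_alt
  simp only
  split_ifs with h
  · rfl
  · rw [pvFoldA_eq_keepIdx, List.nil_append, pvKeepIdx_eq_altKeep]
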